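-- pv_equiv track=rewrite | github.com/buurguees/bot_trading_v10 | core/monitoring/callbacks/home_callbacks.py | _get_alert_badge_color
-- ===== SOURCE A (Python) =====
-- from typing import Dict, List, Any, Optional, Tuple
--
-- def _get_alert_badge_color(alerts: List[Dict[str, Any]]) -> str:
--     """
--     Determina el color del badge basado en el tipo de alertas
--     """
--     if not alerts:
--         return "success"
--
--     # Priorizar por severidad
--     alert_types = [alert['type'] for alert in alerts]
--
--     if 'danger' in alert_types:
--         return "danger"
--     elif 'warning' in alert_types:
--         return "warning"
--     elif 'info' in alert_types:
--         return "info"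
--     else:
--         return "success"
-- ===== SOURCE B (Python) =====
-- _PRIORITY = {'danger': 3, 'warning': 2, 'info': 1}
-- _COLOR = {3: 'danger', 2: 'warning', 1: 'info', 0: 'success'}
--
-- def _get_alert_badge_color(alerts):
--     """Single accumulated-maximum pass instead of list-building + ordered membership tests."""
--     rank = 0
--     for alert in alerts:
--         rank = max(rank, _PRIORITY.get(alert['type'], 0))
--     return _COLOR[rank]
-- ===== Notes on version B (the rewrite author's own statement) =====
-- stated objective: alternative
-- what changed: Replaces A's list comprehension plus three ordered membership scans with a single fold that keeps a running maximum severity rank (via a priority map) and decodes the final rank through a rank-to-color map.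
import Mathlib
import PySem

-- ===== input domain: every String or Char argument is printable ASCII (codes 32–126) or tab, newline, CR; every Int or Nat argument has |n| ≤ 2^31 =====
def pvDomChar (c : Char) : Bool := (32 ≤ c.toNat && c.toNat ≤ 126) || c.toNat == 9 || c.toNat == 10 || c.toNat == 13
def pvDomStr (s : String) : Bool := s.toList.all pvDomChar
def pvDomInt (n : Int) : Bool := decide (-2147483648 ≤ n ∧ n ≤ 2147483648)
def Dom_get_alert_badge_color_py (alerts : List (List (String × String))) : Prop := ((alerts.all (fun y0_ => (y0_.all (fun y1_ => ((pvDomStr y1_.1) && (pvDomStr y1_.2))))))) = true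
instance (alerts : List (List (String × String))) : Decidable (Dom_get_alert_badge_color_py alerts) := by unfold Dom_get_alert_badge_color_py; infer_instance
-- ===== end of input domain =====

-- B replaces A's type-list + ordered membership tests with one fold keeping a running
-- maximum severity rank decoded through a rank-to-color map (alternative decomposition).


-- ===== PORT A =====
-- alert['type'] on an assoc-list dict: first matching key (KeyError = none, excluded by Pre_)
def pvLookupType (alert : List (String × String)) : Option String :=
  (alert.find? (fun p => p.1 == "type")).map Prod.snd

def get_alert_badge_color_py (alerts : List (List (String × String))) : String :=
  if alerts = [] then "success"
  else
    let alert_types := alerts.map (fun a => (pvLookupType a).getD "")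
    if alert_types.contains "danger" then "danger"
    else if alert_types.contains "warning" then "warning"
    else if alert_types.contains "info" then "info"
    else "success"

-- ===== PORT B =====
def pvPriority : PySem.Dict String Int :=
  PySem.Dict.ofList [("danger", 3), ("warning", 2), ("info", 1)]
def pvColor : PySem.Dict Int String :=
  PySem.Dict.ofList [(3, "danger"), (2, "warning"), (1, "info"), (0, "success")]

def get_alert_badge_color_py_alt (alerts : List (List (String × String))) : String :=
  let rank := alerts.foldl
    (fun rank alert => max rank (pvPriority.getD ((pvLookupType alert).getD "") 0)) 0
  (pvColor.get? rank).getD ""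

-- ===== PRECONDITION & SPEC =====
-- Pre_ excludes exactly the inputs where some alert dict has no 'type' key: there A
-- (and B) raise KeyError in Python.
def Pre_get_alert_badge_color_py (alerts : List (List (String × String))) : Prop :=
  ∀ a ∈ alerts, (pvLookupType a).isSome
instance (alerts : List (List (String × String))) : Decidable (Pre_get_alert_badge_color_py alerts) := by unfold Pre_get_alert_badge_color_py; infer_instance
def pvWitness_get_alert_badge_color_py : (List (List (String × String))) :=
  [[("type", "warning")], [("type", "info")]]
def Spec_get_alert_badge_color_py (alerts : List (List (String × String))) (out : String) : Prop := out = get_alert_badge_color_py_alt alerts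
instance (alerts : List (List (String × String))) (out : String) : Decidable (Spec_get_alert_badge_color_py alerts out) := by unfold Spec_get_alert_badge_color_py; infer_instance

-- ===== CLAIM (what is proved, stated in full; the proofs are below) =====
def Claim_equal_get_alert_badge_color_py : Prop := ∀ (alerts : List (List (String × String))), Dom_get_alert_badge_color_py alerts → Pre_get_alert_badge_color_py alerts → Spec_get_alert_badge_color_py alerts (get_alert_badge_color_py alerts)

-- ===== LEMMAS AND PROOFS =====

def pvPrio (s : String) : Int :=
  if s = "danger" then 3 else if s = "warning" then 2 else if s = "info" then 1 else 0

-- A's ordered membership chain, as a function of the types list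
def pvC (ts : List String) : Int :=
  if ts.contains "danger" then 3
  else if ts.contains "warning" then 2
  else if ts.contains "info" then 1 else 0

theorem pvPriority_items :
    pvPriority = PySem.Dict.mk [("danger", 3), ("warning", 2), ("info", 1)] := by decide

theorem pvPriority_getD (s : String) : pvPriority.getD s 0 = pvPrio s := by
  unfold pvPrio
  by_cases h1 : s = "danger"
  · subst h1; decide
  by_cases h2 : s = "warning"
  · subst h2; decide
  by_cases h3 : s = "info"
  · subst h3; decide
  have b1 : ("danger" == s) = false := by simp [Ne.symm h1]
  have b2 : ("warning" == s) = false := by simp [Ne.symm h2]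
  have b3 : ("info" == s) = false := by simp [Ne.symm h3]
  simp [pvPriority_items, PySem.Dict.getD, PySem.Dict.get?, List.find?, b1, b2, b3,
    h1, h2, h3]

-- one step of the fold absorbed into the membership chain
theorem pvStep (t : String) (d w i : Bool) :
    max (pvPrio t) (if d then (3 : Int) else if w then 2 else if i then 1 else 0)
      = if ("danger" == t || d) then 3
        else if ("warning" == t || w) then 2
        else if ("info" == t || i) then 1 else 0 := by
  unfold pvPrio
  by_cases h1 : t = "danger"
  · subst h1; cases d <;> cases w <;> cases i <;> decide
  by_cases h2 : t = "warning"
  · subst h2; cases d <;> cases w <;> cases i <;> decide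
  by_cases h3 : t = "info"
  · subst h3; cases d <;> cases w <;> cases i <;> decide
  have b1 : ("danger" == t) = false := by simp [Ne.symm h1]
  have b2 : ("warning" == t) = false := by simp [Ne.symm h2]
  have b3 : ("info" == t) = false := by simp [Ne.symm h3]
  cases d <;> cases w <;> cases i <;>
    simp [h1, h2, h3, b1, b2, b3, max_def] <;> split_ifs <;> omega

-- the fold's running maximum equals max of the start with A's membership chain
theorem pvFold_eq (alerts : List (List (String × String))) (r : Int) (hr : 0 ≤ r) :
    alerts.foldl (fun rank alert => max rank (pvPrio ((pvLookupType alert).getD ""))) r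
      = max r (pvC (alerts.map (fun a => (pvLookupType a).getD ""))) := by
  induction alerts generalizing r with
  | nil =>
    simp only [List.foldl_nil, List.map_nil]
    simp [pvC] <;> omega
  | cons a l ih =>
    rw [List.foldl_cons, ih _ (le_trans hr (le_max_left _ _)), max_assoc]
    congr 1
    simp only [List.map_cons, pvC, List.contains_cons]
    exact pvStep _ _ _ _

-- ===== VERDICT (by name: the statement is the Claim_ definition above) =====
theorem get_alert_badge_color_py_spec : Claim_equal_get_alert_badge_color_py := by
  intro alerts _ _
  show get_alert_badge_color_py alerts = get_alert_badge_color_py_alt alerts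
  unfold get_alert_badge_color_py get_alert_badge_color_py_alt
  simp only [pvPriority_getD]
  rw [pvFold_eq _ _ (le_refl 0)]
  cases alerts with
  | nil => decide
  | cons a l =>
    simp only [if_neg (List.cons_ne_nil a l), pvC]
    by_cases h1 : ((a :: l).map (fun a => (pvLookupType a).getD "")).contains "danger" <;>
      by_cases h2 : ((a :: l).map (fun a => (pvLookupType a).getD "")).contains "warning" <;>
        by_cases h3 : ((a :: l).map (fun a => (pvLookupType a).getD "")).contains "info" <;>
          simp only [h1, h2, h3, if_true, if_false, Bool.false_eq_true] <;> decide
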